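-- pv_equiv track=rewrite | github.com/henryh28/coding_practice | string_manipulation/value_of_removed_characters.py | ascii_distance
-- ===== SOURCE A (Python) =====
-- def ascii_distance(str1, str2):
--   str_1_dict = {}
--   removed_ascii_value = 0
--
--   # Read letter and their frequency into a dictionary
--   for char in str1:
--     str_1_dict[char] = 1 if char not in str_1_dict else str_1_dict[char] + 1
--
--   '''
--     Compare letters in second string and to first string letters
--     in the dictionary. Reduce the value of each letter/key for each
--     occurence in second string.  Remove key from dictionary if
--     Value ever becomes zero. If letter is not in dictionary,
--     add the ascii value for the nonmatching character right away
--   '''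
--   for char in str2:
--     if char in str_1_dict:
--       str_1_dict[char] -= 1
--
--       if str_1_dict[char] <= 0:
--         str_1_dict.pop(char, None)
--     else:
--       removed_ascii_value += ord(char)
--
--   # Add ascii value of remaining key in dictionary value number of
--   # times to answer
--   for key, value in str_1_dict.items():
--     for i in range(value):
--       removed_ascii_value += ord(key)
--
--   return (removed_ascii_value)
-- ===== SOURCE B (Python) =====
-- def ascii_distance(str1, str2):
--     # Build a frequency table for each string, then compare the two
--     # tables once: each character contributes its ASCII value times
--     # the absolute difference of its counts in the two strings.
--     counts1 = {}
--     for ch in str1: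
--         counts1[ch] = counts1.get(ch, 0) + 1
--     counts2 = {}
--     for ch in str2:
--         counts2[ch] = counts2.get(ch, 0) + 1
--     total = 0
--     for ch, n in counts1.items():
--         total += ord(ch) * abs(n - counts2.get(ch, 0))
--     for ch, n in counts2.items():
--         if ch not in counts1:
--             total += ord(ch) * n
--     return total
-- ===== Notes on version B (the rewrite author's own statement) =====
-- stated objective: simpler
-- what changed: Replaces the single mutable table that is streamed against str2 (decrement, pop at zero, accumulate misses) with two precomputed frequency tables compared in one pass via ord(ch)*abs(count1-count2).
import Mathlib
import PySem

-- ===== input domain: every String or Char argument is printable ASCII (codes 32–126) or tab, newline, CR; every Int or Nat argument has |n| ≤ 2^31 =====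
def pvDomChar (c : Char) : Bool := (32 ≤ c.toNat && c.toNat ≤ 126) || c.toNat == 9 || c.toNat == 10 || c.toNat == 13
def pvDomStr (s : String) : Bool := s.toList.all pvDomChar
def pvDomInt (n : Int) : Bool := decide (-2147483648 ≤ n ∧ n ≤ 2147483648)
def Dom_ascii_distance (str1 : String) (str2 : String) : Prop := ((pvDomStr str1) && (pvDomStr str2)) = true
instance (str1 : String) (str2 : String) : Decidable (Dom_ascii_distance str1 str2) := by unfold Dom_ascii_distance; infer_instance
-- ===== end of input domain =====

-- B replaces A's single mutable table streamed against str2 (decrement, pop at zero,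
-- accumulate misses) with two precomputed frequency tables compared once via
-- ord(ch)*abs(count1-count2); same result, simpler control flow (objective: simpler).

-- ===== PORT A =====
-- second loop of A: stream str2 against the table, decrementing / popping / accumulating
def asciiStep (st : PySem.Dict Char Int × Int) (c : Char) : PySem.Dict Char Int × Int :=
  if st.1.contains c then
    let d := st.1.insert c (st.1.getD c 0 - 1)
    if d.getD c 0 ≤ 0 then (d.erase c, st.2) else (d, st.2)
  else (st.1, st.2 + (c.toNat : Int))

-- third loop of A: for each remaining key, add its ord 'value' times
def asciiFinish (st : PySem.Dict Char Int × Int) : Int :=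
  st.1.items.foldl
    (fun acc kv => (PySem.List.pyRange 0 kv.2 1).foldl (fun a _ => a + (kv.1.toNat : Int)) acc)
    st.2

def ascii_distance (str1 : String) (str2 : String) : Int :=
  let str_1_dict : PySem.Dict Char Int := str1.toList.foldl
    (fun d c => d.insert c (if d.contains c = false then 1 else d.getD c 0 + 1))
    PySem.Dict.empty
  asciiFinish (str2.toList.foldl asciiStep (str_1_dict, 0))

-- ===== PORT B =====
def ascii_distance_alt (str1 : String) (str2 : String) : Int :=
  let counts1 : PySem.Dict Char Int :=
    str1.toList.foldl (fun d c => d.insert c (d.getD c 0 + 1)) PySem.Dict.empty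
  let counts2 : PySem.Dict Char Int :=
    str2.toList.foldl (fun d c => d.insert c (d.getD c 0 + 1)) PySem.Dict.empty
  let total := counts1.items.foldl
    (fun acc kv => acc + (kv.1.toNat : Int) * |kv.2 - counts2.getD kv.1 0|) 0
  counts2.items.foldl
    (fun acc kv => if counts1.contains kv.1 = false then acc + (kv.1.toNat : Int) * kv.2 else acc)
    total

-- ===== PRECONDITION & SPEC =====
def Spec_ascii_distance (str1 : String) (str2 : String) (out : Int) : Prop := out = ascii_distance_alt str1 str2
instance (str1 : String) (str2 : String) (out : Int) : Decidable (Spec_ascii_distance str1 str2 out) := by unfold Spec_ascii_distance; infer_instance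

-- ===== CLAIM (what is proved, stated in full; the proofs are below) =====
def Claim_equal_ascii_distance : Prop := ∀ (str1 : String) (str2 : String), Dom_ascii_distance str1 str2 → Spec_ascii_distance str1 str2 (ascii_distance str1 str2)

-- ===== LEMMAS AND PROOFS =====

-- the common value both programs compute: Σ over all occurring chars of ord·|count₁ − count₂|
def asciiSum (s1 s2 : List Char) : Int :=
  ∑ k ∈ (s1 ++ s2).toFinset, (k.toNat : Int) * |(s1.count k : Int) - (s2.count k : Int)|

lemma bool_eq_false {b : Bool} (h : ¬ b = true) : b = false := by
  cases b
  · rfl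
  · exact absurd rfl h

lemma list_contains_iff (l : List Char) (a : Char) : l.contains a = true ↔ a ∈ l := by
  simp

lemma count_cons_ne (k c : Char) (t : List Char) (h : ¬ k = c) :
    List.count k (c :: t) = List.count k t := by
  have h' : ¬ c = k := fun hh => h hh.symm
  simp [h']

-- a fold that adds a constant per element
lemma foldl_const_add {α : Type} (l : List α) (c : Int) :
    ∀ a : Int, l.foldl (fun x _ => x + c) a = a + l.length * c := by
  induction l with
  | nil => intro a; simp
  | cons x t ih => intro a; simp only [List.foldl_cons, ih, List.length_cons]; push_cast; ring

lemma find?_cons_eq {α : Type} (f : α → Bool) (x : α) (l : List α) :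
    List.find? f (x :: l) = if f x = true then some x else List.find? f l := by
  cases h : f x
  · rw [List.find?_cons_of_neg (by simp [h]), if_neg (by simp [h])]
  · rw [List.find?_cons_of_pos h, if_pos rfl]

-- get? after erase
lemma dict_get?_erase (d : PySem.Dict Char Int) (a k : Char) :
    (d.erase a).get? k = if k = a then none else d.get? k := by
  simp only [PySem.Dict.erase, PySem.Dict.get?]
  by_cases hk : k = a
  · subst hk
    rw [if_pos rfl]
    have hnone : (d.items.filter (fun p => !(p.1 == k))).find? (fun p => p.1 == k) = none := by
      rw [List.find?_eq_none]
      intro x hx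
      have hx2 := (List.mem_filter.mp hx).2
      simp only [Bool.not_eq_eq_eq_not, Bool.not_true] at hx2
      simp [hx2]
    rw [hnone]
    rfl
  · rw [if_neg hk]
    congr 1
    induction d.items with
    | nil => rfl
    | cons p rest ih =>
      by_cases hp : (p.1 == a) = true
      · have hpk : (p.1 == k) = false := by
          rw [beq_eq_false_iff_ne]
          intro h
          exact hk (h ▸ eq_of_beq hp)
        rw [List.filter_cons_of_neg (by simp [hp]), find?_cons_eq, hpk,
          if_neg (by simp), ih]
      · rw [List.filter_cons_of_pos (by simp [hp]), find?_cons_eq, find?_cons_eq]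
        cases hpk : (p.1 == k)
        · rw [if_neg (by simp), if_neg (by simp)]
          exact ih
        · rw [if_pos rfl, if_pos rfl]

lemma dict_getD_erase (d : PySem.Dict Char Int) (a k : Char) (d0 : Int) :
    (d.erase a).getD k d0 = if k = a then d0 else d.getD k d0 := by
  rw [PySem.Dict.getD_eq_get?_getD, dict_get?_erase]
  by_cases hk : k = a
  · rw [if_pos hk, if_pos hk]
    rfl
  · rw [if_neg hk, if_neg hk, PySem.Dict.getD_eq_get?_getD]

lemma dict_contains_erase (d : PySem.Dict Char Int) (a k : Char)
    (h : (d.erase a).contains k = true) : k ≠ a ∧ d.contains k = true := by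
  rw [PySem.Dict.contains_eq_isSome_get?, dict_get?_erase] at h
  by_cases hk : k = a
  · rw [if_pos hk] at h
    simp at h
  · refine ⟨hk, ?_⟩
    rw [if_neg hk] at h
    rw [PySem.Dict.contains_eq_isSome_get?]
    exact h

lemma dict_nodup_keys_erase (d : PySem.Dict Char Int) (a : Char)
    (h : d.keys.Nodup) : (d.erase a).keys.Nodup := by
  simp only [PySem.Dict.erase, PySem.Dict.keys] at h ⊢
  exact List.Nodup.sublist (List.Sublist.map _ List.filter_sublist) h

-- sum over the distinct chars of a list as a Finset sum
lemma toFinset_dedup (xs : List Char) : (PySem.List.dedup xs).toFinset = xs.toFinset := by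
  apply Finset.ext
  intro x
  simp only [List.mem_toFinset]
  exact PySem.List.mem_dedup xs x

-- MAIN INVARIANT for A's streaming pass + final pass:
-- if the table has nodup keys, all stored counts positive, and U covers the table's keys
-- and the remaining input, the rest of A computes acc + Σ_{k∈U} ord k · |table(k) − count t k|.
lemma ascii_main (t : List Char) :
    ∀ (d : PySem.Dict Char Int) (acc : Int) (U : Finset Char),
    d.keys.Nodup →
    (∀ k, d.contains k = true → 0 < d.getD k 0) →
    (∀ k ∈ d.keys, k ∈ U) →
    (∀ k ∈ t, k ∈ U) →
    asciiFinish (t.foldl asciiStep (d, acc)) =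
      acc + ∑ k ∈ U, (k.toNat : Int) * |d.getD k 0 - (t.count k : Int)| := by
  induction t with
  | nil =>
    intro d acc U hnd hpos hcov _
    simp only [List.foldl_nil, asciiFinish]
    have hbody : (fun (acc : Int) (kv : Char × Int) =>
        (PySem.List.pyRange 0 kv.2 1).foldl (fun a _ => a + (kv.1.toNat : Int)) acc)
        = fun acc kv => acc + ((kv.2.toNat : Nat) : Int) * (kv.1.toNat : Int) := by
      funext a kv
      rw [foldl_const_add, PySem.List.length_pyRange_one]
      simp
    rw [hbody, PySem.List.foldl_add, PySem.Dict.items_eq_map_keys d hnd 0, List.map_map]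
    congr 1
    rw [← List.sum_toFinset _ hnd]
    have hsub : d.keys.toFinset ⊆ U := fun k hk => hcov k (List.mem_toFinset.mp hk)
    rw [Finset.sum_subset hsub (by
      intro k _ hk
      have hcF : d.contains k = false := bool_eq_false (fun h =>
        hk (List.mem_toFinset.mpr ((PySem.Dict.contains_iff_mem_keys d k).mp h)))
      simp [Function.comp_def, PySem.Dict.getD_of_not_contains d 0 hcF])]
    apply Finset.sum_congr rfl
    intro k _
    simp only [Function.comp_def, List.count_nil, Nat.cast_zero, sub_zero]
    cases hc : d.contains k
    · rw [PySem.Dict.getD_of_not_contains d 0 hc]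
      simp
    · have hp := hpos k hc
      rw [Int.toNat_of_nonneg hp.le, abs_of_pos hp, mul_comm]
  | cons c t' ih =>
    intro d acc U hnd hpos hcov hcovt
    have hcovt' : ∀ k ∈ t', k ∈ U := fun k hk => hcovt k (List.mem_cons_of_mem c hk)
    simp only [List.foldl_cons]
    by_cases hc : d.contains c = true
    · have hv : 0 < d.getD c 0 := hpos c hc
      by_cases hle : d.getD c 0 - 1 ≤ 0
      · -- count hits zero: the key is popped
        have hv1 : d.getD c 0 = 1 := by omega
        have hstep : asciiStep (d, acc) c = ((d.insert c (d.getD c 0 - 1)).erase c, acc) := by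
          simp [asciiStep, hc, PySem.Dict.getD_insert_self, hle]
        rw [hstep]
        set e := (d.insert c (d.getD c 0 - 1)).erase c with he
        have hE : ∀ k, e.getD k 0 = if k = c then 0 else d.getD k 0 := by
          intro k
          rw [he, dict_getD_erase]
          by_cases hk : k = c
          · rw [if_pos hk, if_pos hk]
          · rw [if_neg hk, if_neg hk, PySem.Dict.getD_insert, if_neg hk]
        have hEc : ∀ k, e.contains k = true → k ≠ c ∧ d.contains k = true := by
          intro k hk
          obtain ⟨h1, h2⟩ := dict_contains_erase _ _ _ hk
          refine ⟨h1, ?_⟩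
          rw [PySem.Dict.contains_eq_isSome_get?] at h2 ⊢
          rw [PySem.Dict.get?_insert, if_neg h1] at h2
          exact h2
        rw [ih e acc U
          (dict_nodup_keys_erase _ _ (PySem.Dict.nodup_keys_insert _ _ _ hnd))
          (by intro k hk
              obtain ⟨h1, h2⟩ := hEc k hk
              rw [hE k, if_neg h1]
              exact hpos k h2)
          (by intro k hk
              have hck := (PySem.Dict.contains_iff_mem_keys e k).mpr hk
              obtain ⟨_, h2⟩ := hEc k hck
              exact hcov k ((PySem.Dict.contains_iff_mem_keys d k).mp h2))
          hcovt']
        congr 1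
        apply Finset.sum_congr rfl
        intro k _
        by_cases hk : k = c
        · subst hk
          rw [hE k, if_pos rfl, hv1, List.count_cons_self]
          push_cast
          congr 1
          rw [zero_sub, abs_neg]
          have h2 : (1 : Int) - ((t'.count k : Int) + 1) = -(t'.count k : Int) := by ring
          rw [h2, abs_neg]
        · rw [hE k, if_neg hk, count_cons_ne k c t' hk]
      · -- count stays positive: the key is kept with the decremented count
        have hstep : asciiStep (d, acc) c = (d.insert c (d.getD c 0 - 1), acc) := by
          simp [asciiStep, hc, PySem.Dict.getD_insert_self, hle]
        rw [hstep]
        rw [ih (d.insert c (d.getD c 0 - 1)) acc U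
          (PySem.Dict.nodup_keys_insert _ _ _ hnd)
          (by intro k hk
              rw [PySem.Dict.getD_insert]
              by_cases hkc : k = c
              · rw [if_pos hkc]; omega
              · rw [if_neg hkc]
                apply hpos
                rw [PySem.Dict.contains_insert] at hk
                simpa [hkc] using hk)
          (by intro k hk
              rw [PySem.Dict.keys_insert_of_contains _ _ hc] at hk
              exact hcov k hk)
          hcovt']
        congr 1
        apply Finset.sum_congr rfl
        intro k _
        by_cases hk : k = c
        · subst hk
          rw [PySem.Dict.getD_insert, if_pos rfl, List.count_cons_self]
          push_cast
          congr 1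
          ring
        · rw [PySem.Dict.getD_insert, if_neg hk, count_cons_ne k c t' hk]
    · -- miss: accumulate ord c
      have hcF : d.contains c = false := bool_eq_false hc
      have hstep : asciiStep (d, acc) c = (d, acc + (c.toNat : Int)) := by
        simp [asciiStep, hcF]
      rw [hstep]
      rw [ih d (acc + (c.toNat : Int)) U hnd hpos hcov hcovt']
      have hcU : c ∈ U := hcovt c List.mem_cons_self
      rw [← Finset.add_sum_erase U _ hcU, ← Finset.add_sum_erase U
        (fun k => (k.toNat : Int) * |d.getD k 0 - ((c :: t').count k : Int)|) hcU]
      have hrest : ∑ k ∈ U.erase c, (k.toNat : Int) * |d.getD k 0 - (t'.count k : Int)|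
          = ∑ k ∈ U.erase c, (k.toNat : Int) * |d.getD k 0 - ((c :: t').count k : Int)| := by
        apply Finset.sum_congr rfl
        intro k hk
        rw [count_cons_ne k c t' (Finset.mem_erase.mp hk).1]
      have hterm : (c.toNat : Int) * |d.getD c 0 - ((c :: t').count c : Int)|
          = (c.toNat : Int) * |d.getD c 0 - (t'.count c : Int)| + (c.toNat : Int) := by
        rw [PySem.Dict.getD_of_not_contains d 0 hcF, List.count_cons_self]
        push_cast
        rw [zero_sub, zero_sub, abs_neg, abs_neg,
          abs_of_nonneg (by positivity : (0:Int) ≤ (t'.count c : Int) + 1),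
          abs_of_nonneg (by positivity : (0:Int) ≤ (t'.count c : Int))]
        ring
      rw [hrest, hterm]
      ring

-- A computes asciiSum
lemma ascii_distance_eq_sum (str1 str2 : String) :
    ascii_distance str1 str2 = asciiSum str1.toList str2.toList := by
  have h0 : ascii_distance str1 str2 = asciiFinish (str2.toList.foldl asciiStep
      (str1.toList.foldl
        (fun d c => d.insert c (if d.contains c = false then 1 else d.getD c 0 + 1))
        PySem.Dict.empty, 0)) := rfl
  rw [h0]
  have hfun : (fun (d : PySem.Dict Char Int) c =>
      d.insert c (if d.contains c = false then 1 else d.getD c 0 + 1))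
      = fun d c => d.insert c (d.getD c 0 + 1) := by
    funext d c
    cases hc : d.contains c
    · rw [PySem.Dict.getD_of_not_contains d 0 hc]
      simp
    · simp [hc]
  rw [hfun, PySem.Dict.foldl_insert_getD_add_one_eq_counter]
  rw [ascii_main str2.toList (PySem.Dict.counter str1.toList) 0 ((str1.toList ++ str2.toList).toFinset)
    (PySem.Dict.nodup_keys_counter _)
    (by intro k hk
        rw [PySem.Dict.getD_counter]
        rw [PySem.Dict.contains_counter, list_contains_iff] at hk
        exact_mod_cast List.count_pos_iff.mpr hk)
    (by intro k hk
        rw [PySem.Dict.keys_counter, ← PySem.List.dedup_eq_ofList] at hk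
        simp only [List.mem_toFinset, List.mem_append]
        exact Or.inl ((PySem.List.mem_dedup _ _).mp hk))
    (by intro k hk
        simp only [List.mem_toFinset, List.mem_append]
        exact Or.inr hk)]
  unfold asciiSum
  rw [zero_add]
  apply Finset.sum_congr rfl
  intro k _
  rw [PySem.Dict.getD_counter]

-- B computes asciiSum
lemma ascii_distance_alt_eq_sum (str1 str2 : String) :
    ascii_distance_alt str1 str2 = asciiSum str1.toList str2.toList := by
  simp only [ascii_distance_alt]
  rw [PySem.Dict.foldl_insert_getD_add_one_eq_counter, PySem.Dict.foldl_insert_getD_add_one_eq_counter]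
  set s1 := str1.toList
  set s2 := str2.toList
  rw [PySem.List.foldl_add]
  have hfun : (fun (acc : Int) (kv : Char × Int) =>
      if (PySem.Dict.counter s1).contains kv.1 = false then acc + (kv.1.toNat : Int) * kv.2 else acc)
      = fun acc kv => acc + (if (PySem.Dict.counter s1).contains kv.1 = false then (kv.1.toNat : Int) * kv.2 else 0) := by
    funext a kv
    by_cases h : (PySem.Dict.counter s1).contains kv.1 = false
    · rw [if_pos h, if_pos h]
    · rw [if_neg h, if_neg h, add_zero]
  rw [hfun, PySem.List.foldl_add]
  rw [PySem.Dict.items_counter, PySem.Dict.items_counter, List.map_map, List.map_map]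
  have h1 : ((PySem.Set.ofList s1).map ((fun kv : Char × Int => (kv.1.toNat : Int) * |kv.2 - (PySem.Dict.counter s2).getD kv.1 0|) ∘ fun k => (k, (s1.count k : Int)))).sum
      = ∑ k ∈ s1.toFinset, (k.toNat : Int) * |(s1.count k : Int) - (s2.count k : Int)| := by
    rw [← PySem.List.dedup_eq_ofList, ← List.sum_toFinset _ (PySem.List.nodup_dedup s1), toFinset_dedup]
    apply Finset.sum_congr rfl
    intro k _
    simp [Function.comp_def, PySem.Dict.getD_counter]
  have h2 : ((PySem.Set.ofList s2).map ((fun kv : Char × Int => if (PySem.Dict.counter s1).contains kv.1 = false then (kv.1.toNat : Int) * kv.2 else 0) ∘ fun k => (k, (s2.count k : Int)))).sum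
      = ∑ k ∈ s2.toFinset, (if k ∈ s1 then 0 else (k.toNat : Int) * (s2.count k : Int)) := by
    rw [← PySem.List.dedup_eq_ofList, ← List.sum_toFinset _ (PySem.List.nodup_dedup s2), toFinset_dedup]
    apply Finset.sum_congr rfl
    intro k _
    simp only [Function.comp_def, PySem.Dict.contains_counter]
    by_cases hk : k ∈ s1
    · rw [if_pos hk, if_neg (by simp [list_contains_iff, hk])]
    · rw [if_neg hk, if_pos (by simp [hk])]
  rw [h1, h2, zero_add]
  unfold asciiSum
  rw [List.toFinset_append, ← Finset.union_sdiff_self_eq_union,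
    Finset.sum_union Finset.disjoint_sdiff]
  congr 1
  have h3 : ∑ k ∈ s2.toFinset \ s1.toFinset, (if k ∈ s1 then 0 else (k.toNat : Int) * (s2.count k : Int))
      = ∑ k ∈ s2.toFinset, (if k ∈ s1 then 0 else (k.toNat : Int) * (s2.count k : Int)) := by
    apply Finset.sum_subset Finset.sdiff_subset
    intro k hk2 hkd
    have hk1 : k ∈ s1 := by
      by_contra h
      exact hkd (Finset.mem_sdiff.mpr ⟨hk2, by simpa [List.mem_toFinset] using h⟩)
    rw [if_pos hk1]
  rw [← h3]
  apply Finset.sum_congr rfl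
  intro k hk
  have hk1 : k ∉ s1 := by
    have := (Finset.mem_sdiff.mp hk).2
    simpa [List.mem_toFinset] using this
  rw [if_neg hk1]
  have hc0 : s1.count k = 0 := List.count_eq_zero.mpr hk1
  rw [hc0]
  push_cast
  rw [zero_sub, abs_neg, abs_of_nonneg (by positivity : (0:Int) ≤ (s2.count k : Int))]

-- ===== VERDICT (by name: the statement is the Claim_ definition above) =====
theorem ascii_distance_spec : Claim_equal_ascii_distance := by
  intro str1 str2 _
  unfold Spec_ascii_distance
  rw [ascii_distance_eq_sum, ascii_distance_alt_eq_sum]
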